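-- pv_equiv track=rewrite | github.com/legal-switchhitter784/rockpile | scripts/png-to-pixel-svg.py | pixels_to_svg
-- ===== SOURCE A (Python) =====
-- def pixels_to_svg(width, height, rows, scale=1):
--     """Convert pixel data to SVG string with grouped colors for compression."""
--     # Group pixels by color
--     color_pixels = {}
--     for y, row in enumerate(rows):
--         for x, (r, g, b, a) in enumerate(row):
--             if a == 0:
--                 continue
--             if a == 255:
--                 color = f"#{r:02x}{g:02x}{b:02x}"
--             else:
--                 color = f"#{r:02x}{g:02x}{b:02x}{a:02x}"
--
--             if color not in color_pixels:
--                 color_pixels[color] = []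
--             color_pixels[color].append((x, y))
--
--     svg_w = width * scale
--     svg_h = height * scale
--
--     lines = [
--         f'<svg xmlns="http://www.w3.org/2000/svg" viewBox="0 0 {svg_w} {svg_h}" width="{svg_w}" height="{svg_h}" shape-rendering="crispEdges">',
--     ]
--
--     for color, pixels in sorted(color_pixels.items(), key=lambda x: -len(x[1])):
--         # Merge horizontal runs for compression
--         runs = merge_runs(pixels, scale)
--         if len(runs) == 1:
--             x, y, w, h = runs[0]
--             lines.append(f'  <rect x="{x}" y="{y}" width="{w}" height="{h}" fill="{color}"/>')
--         else:
--             lines.append(f'  <g fill="{color}">')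
--             for x, y, w, h in runs:
--                 lines.append(f'    <rect x="{x}" y="{y}" width="{w}" height="{h}"/>')
--             lines.append('  </g>')
--
--     lines.append('</svg>')
--     return '\n'.join(lines)
--
-- def merge_runs(pixels, scale):
--     """Merge adjacent horizontal pixels into wider rects."""
--     # Sort by y, then x
--     pixels.sort(key=lambda p: (p[1], p[0]))
--
--     runs = []
--     i = 0
--     while i < len(pixels):
--         x0, y0 = pixels[i]
--         # Extend horizontally
--         run_len = 1
--         while i + run_len < len(pixels):
--             nx, ny = pixels[i + run_len]
--             if ny == y0 and nx == x0 + run_len: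
--                 run_len += 1
--             else:
--                 break
--         runs.append((x0 * scale, y0 * scale, run_len * scale, scale))
--         i += run_len
--
--     return runs
-- ===== SOURCE B (Python) =====
-- # B: single-pass grouping that builds run-merged rects incrementally per color
-- # (count, finished runs, pending run) instead of A's pixel lists + per-color sort + merge pass.
-- def pixels_to_svg(width, height, rows, scale=1):
--     """Convert pixel data to SVG string with grouped colors for compression."""
--     acc = {}  # color -> (pixel_count, finished_runs, pending (x0, y0, len))
--     for y, row in enumerate(rows):
--         for x, (r, g, b, a) in enumerate(row):
--             if a == 0:
--                 continue
--             if a == 255: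
--                 color = f"#{r:02x}{g:02x}{b:02x}"
--             else:
--                 color = f"#{r:02x}{g:02x}{b:02x}{a:02x}"
--             st = acc.get(color)
--             if st is None:
--                 acc[color] = (1, [], (x, y, 1))
--             else:
--                 cnt, runs, (x0, y0, n) = st
--                 if y == y0 and x == x0 + n:
--                     acc[color] = (cnt + 1, runs, (x0, y0, n + 1))
--                 else:
--                     acc[color] = (cnt + 1, runs + [(x0 * scale, y0 * scale, n * scale, scale)], (x, y, 1))
--     svg_w = width * scale
--     svg_h = height * scale
--     lines = [
--         f'<svg xmlns="http://www.w3.org/2000/svg" viewBox="0 0 {svg_w} {svg_h}" width="{svg_w}" height="{svg_h}" shape-rendering="crispEdges">',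
--     ]
--     for color, (cnt, runs, (x0, y0, n)) in sorted(acc.items(), key=lambda kv: -kv[1][0]):
--         runs = runs + [(x0 * scale, y0 * scale, n * scale, scale)]
--         if len(runs) == 1:
--             x, yy, w, h = runs[0]
--             lines.append(f'  <rect x="{x}" y="{yy}" width="{w}" height="{h}" fill="{color}"/>')
--         else:
--             lines.append(f'  <g fill="{color}">')
--             for x, yy, w, h in runs:
--                 lines.append(f'    <rect x="{x}" y="{yy}" width="{w}" height="{h}"/>')
--             lines.append('  </g>')
--     lines.append('</svg>')
--     return '\n'.join(lines)
-- ===== Notes on version B (the rewrite author's own statement) =====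
-- stated objective: alternative
-- what changed: B does a single row-major pass that coalesces horizontal runs incrementally per color (dict color -> (count, finished runs, pending run)), replacing A's per-color pixel-list accumulation followed by a per-color sort and a separate index-based run-merging loop.
import Mathlib
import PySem

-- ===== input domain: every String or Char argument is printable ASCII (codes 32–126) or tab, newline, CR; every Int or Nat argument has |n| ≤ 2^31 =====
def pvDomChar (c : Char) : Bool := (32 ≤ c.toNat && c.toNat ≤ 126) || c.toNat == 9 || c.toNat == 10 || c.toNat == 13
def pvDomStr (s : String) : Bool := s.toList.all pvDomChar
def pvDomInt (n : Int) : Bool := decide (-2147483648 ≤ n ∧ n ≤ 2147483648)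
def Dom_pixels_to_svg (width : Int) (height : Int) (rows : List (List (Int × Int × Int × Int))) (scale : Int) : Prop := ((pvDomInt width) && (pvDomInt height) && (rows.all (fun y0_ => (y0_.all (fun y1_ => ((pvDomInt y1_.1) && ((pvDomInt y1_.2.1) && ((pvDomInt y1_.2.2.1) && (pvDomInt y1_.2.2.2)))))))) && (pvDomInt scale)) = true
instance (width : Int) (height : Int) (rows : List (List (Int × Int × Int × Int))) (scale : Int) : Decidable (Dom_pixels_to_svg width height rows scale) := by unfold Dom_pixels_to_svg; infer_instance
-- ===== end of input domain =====

-- B replaces A's per-color pixel lists + per-color sort + merge pass with one pass that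
-- coalesces horizontal runs incrementally per color (objective: alternative decomposition).

-- ===== PORT A =====
-- shared formatting helpers (both Pythons build the identical f-strings)
def pvHexDigit (d : Nat) : Char := if d < 10 then Char.ofNat (48 + d) else Char.ofNat (87 + d)

def pvHexDigits : Nat → List Char
  | 0 => []
  | n + 1 => pvHexDigits ((n + 1) / 16) ++ [pvHexDigit ((n + 1) % 16)]
decreasing_by exact Nat.div_lt_self (Nat.succ_pos n) (by omega)

-- f"{n:02x}": lowercase hex, zero-padded to width 2, '-' prefix for negatives (exact Python format)
def pvHex02 (n : Int) : String :=
  if n < 0 then "-" ++ String.ofList (pvHexDigits (-n).toNat)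
  else if n < 16 then "0" ++ String.ofList (if n = 0 then ['0'] else pvHexDigits n.toNat)
  else String.ofList (pvHexDigits n.toNat)

def pvColor (r g b a : Int) : String :=
  if a == 255 then "#" ++ pvHex02 r ++ pvHex02 g ++ pvHex02 b
  else "#" ++ pvHex02 r ++ pvHex02 g ++ pvHex02 b ++ pvHex02 a

def pvHeader (w h : Int) : String :=
  "<svg xmlns=\"http://www.w3.org/2000/svg\" viewBox=\"0 0 " ++ PySem.Int.toStr w ++ " " ++
    PySem.Int.toStr h ++ "\" width=\"" ++ PySem.Int.toStr w ++ "\" height=\"" ++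
    PySem.Int.toStr h ++ "\" shape-rendering=\"crispEdges\">"

def pvRectLine (run : Int × Int × Int × Int) (color : String) : String :=
  "  <rect x=\"" ++ PySem.Int.toStr run.1 ++ "\" y=\"" ++ PySem.Int.toStr run.2.1 ++
    "\" width=\"" ++ PySem.Int.toStr run.2.2.1 ++ "\" height=\"" ++ PySem.Int.toStr run.2.2.2 ++
    "\" fill=\"" ++ color ++ "\"/>"

def pvGRectLine (run : Int × Int × Int × Int) : String :=
  "    <rect x=\"" ++ PySem.Int.toStr run.1 ++ "\" y=\"" ++ PySem.Int.toStr run.2.1 ++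
    "\" width=\"" ++ PySem.Int.toStr run.2.2.1 ++ "\" height=\"" ++ PySem.Int.toStr run.2.2.2 ++ "\"/>"

-- 'if len(runs) == 1: one <rect> else a <g> of <rect>s' (identical emission code in both Pythons)
def pvEmit (color : String) (runs : List (Int × Int × Int × Int)) (lines : List String) : List String :=
  match runs with
  | [run] => lines ++ [pvRectLine run color]
  | rs => (rs.foldl (fun ls run => ls ++ [pvGRectLine run])
            (lines ++ ["  <g fill=\"" ++ color ++ "\">"])) ++ ["  </g>"]

-- the inner 'while i + run_len < len(pixels): …' of merge_runs
def pvExtendRun : List (Int × Int) → Int → Int → Int → Int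
  | [], _, _, run_len => run_len
  | (nx, ny) :: t, x0, y0, run_len =>
    if ny == y0 && nx == x0 + run_len then pvExtendRun t x0 y0 (run_len + 1) else run_len

-- the outer 'while i < len(pixels): …' of merge_runs (i advances by run_len)
def pvMergeLoop (scale : Int) : List (Int × Int) → List (Int × Int × Int × Int)
  | [] => []
  | (x0, y0) :: t =>
    let run_len := pvExtendRun t x0 y0 1
    (x0 * scale, y0 * scale, run_len * scale, scale) :: pvMergeLoop scale (t.drop (run_len - 1).toNat)
termination_by l => l.length
decreasing_by simp

def pvMergeRuns (pixels : List (Int × Int)) (scale : Int) : List (Int × Int × Int × Int) :=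
  pvMergeLoop scale (PySem.List.sorted2 pixels (fun p => p.2) (fun p => p.1))

def pixels_to_svg (width : Int) (height : Int) (rows : List (List (Int × Int × Int × Int))) (scale : Int) : String :=
  let color_pixels : PySem.Dict String (List (Int × Int)) :=
    (PySem.List.enumerate rows 0).foldl (fun d yr =>
      (PySem.List.enumerate yr.2 0).foldl (fun d xp =>
        match xp.2 with
        | (r, g, b, a) =>
          if a == 0 then d
          else
            let color := pvColor r g b a
            let d1 := if d.contains color then d else d.insert color ([] : List (Int × Int))
            d1.insert color (d1.getD color [] ++ [(xp.1, yr.1)])) d) PySem.Dict.empty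
  let svg_w := width * scale
  let svg_h := height * scale
  let lines := [pvHeader svg_w svg_h]
  let lines := (PySem.List.sorted color_pixels.items (fun kv => -(PySem.List.len kv.2))).foldl
    (fun lines kv => pvEmit kv.1 (pvMergeRuns kv.2 scale) lines) lines
  PySem.Str.join "\n" (lines ++ ["</svg>"])

-- ===== PORT B =====
-- per-color incremental state: (pixel count, finished runs, pending run (x0, y0, len))
def pvStepColor (scale : Int) (st : Int × List (Int × Int × Int × Int) × (Int × Int × Int)) (x y : Int) :
    Int × List (Int × Int × Int × Int) × (Int × Int × Int) :=
  match st with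
  | (cnt, runs, (x0, y0, n)) =>
    if y == y0 && x == x0 + n then (cnt + 1, runs, (x0, y0, n + 1))
    else (cnt + 1, runs ++ [(x0 * scale, y0 * scale, n * scale, scale)], (x, y, 1))

def pixels_to_svg_alt (width : Int) (height : Int) (rows : List (List (Int × Int × Int × Int))) (scale : Int) : String :=
  let acc : PySem.Dict String (Int × List (Int × Int × Int × Int) × (Int × Int × Int)) :=
    (PySem.List.enumerate rows 0).foldl (fun d yr =>
      (PySem.List.enumerate yr.2 0).foldl (fun d xp =>
        match xp.2 with
        | (r, g, b, a) =>
          if a == 0 then d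
          else
            let color := pvColor r g b a
            match d.get? color with
            | none => d.insert color (1, ([] : List (Int × Int × Int × Int)), (xp.1, yr.1, 1))
            | some st => d.insert color (pvStepColor scale st xp.1 yr.1)) d) PySem.Dict.empty
  let svg_w := width * scale
  let svg_h := height * scale
  let lines := [pvHeader svg_w svg_h]
  let lines := (PySem.List.sorted acc.items (fun kv => -kv.2.1)).foldl
    (fun lines kv =>
      match kv.2 with
      | (_, runs, (x0, y0, n)) =>
        pvEmit kv.1 (runs ++ [(x0 * scale, y0 * scale, n * scale, scale)]) lines) lines
  PySem.Str.join "\n" (lines ++ ["</svg>"])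

-- ===== PRECONDITION & SPEC =====
def Spec_pixels_to_svg (width : Int) (height : Int) (rows : List (List (Int × Int × Int × Int))) (scale : Int) (out : String) : Prop := out = pixels_to_svg_alt width height rows scale
instance (width : Int) (height : Int) (rows : List (List (Int × Int × Int × Int))) (scale : Int) (out : String) : Decidable (Spec_pixels_to_svg width height rows scale out) := by unfold Spec_pixels_to_svg; infer_instance

-- ===== CLAIM (what is proved, stated in full; the proofs are below) =====
def Claim_equal_pixels_to_svg : Prop := ∀ (width : Int) (height : Int) (rows : List (List (Int × Int × Int × Int))) (scale : Int), Dom_pixels_to_svg width height rows scale → Spec_pixels_to_svg width height rows scale (pixels_to_svg width height rows scale)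


-- ===== LEMMAS AND PROOFS =====

-- named copies of the port loop bodies (definitionally equal to the lambdas in the ports)
def pvInnerA (y : Int) (d : PySem.Dict String (List (Int × Int))) (xp : Int × (Int × Int × Int × Int)) :
    PySem.Dict String (List (Int × Int)) :=
  match xp.2 with
  | (r, g, b, a) =>
    if a == 0 then d
    else
      let color := pvColor r g b a
      let d1 := if d.contains color then d else d.insert color ([] : List (Int × Int))
      d1.insert color (d1.getD color [] ++ [(xp.1, y)])

def pvOuterA (d : PySem.Dict String (List (Int × Int))) (yr : Int × List (Int × Int × Int × Int)) :
    PySem.Dict String (List (Int × Int)) :=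
  (PySem.List.enumerate yr.2 0).foldl (pvInnerA yr.1) d

def pvInnerB (scale y : Int)
    (d : PySem.Dict String (Int × List (Int × Int × Int × Int) × (Int × Int × Int)))
    (xp : Int × (Int × Int × Int × Int)) :
    PySem.Dict String (Int × List (Int × Int × Int × Int) × (Int × Int × Int)) :=
  match xp.2 with
  | (r, g, b, a) =>
    if a == 0 then d
    else
      let color := pvColor r g b a
      match d.get? color with
      | none => d.insert color (1, ([] : List (Int × Int × Int × Int)), (xp.1, y, 1))
      | some st => d.insert color (pvStepColor scale st xp.1 y)

def pvOuterB (scale : Int)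
    (d : PySem.Dict String (Int × List (Int × Int × Int × Int) × (Int × Int × Int)))
    (yr : Int × List (Int × Int × Int × Int)) :
    PySem.Dict String (Int × List (Int × Int × Int × Int) × (Int × Int × Int)) :=
  (PySem.List.enumerate yr.2 0).foldl (pvInnerB scale yr.1) d

def pvEmitA (scale : Int) (lines : List String) (kv : String × List (Int × Int)) : List String :=
  pvEmit kv.1 (pvMergeRuns kv.2 scale) lines

def pvEmitB (scale : Int) (lines : List String)
    (kv : String × (Int × List (Int × Int × Int × Int) × (Int × Int × Int))) : List String :=
  match kv.2 with
  | (_, runs, (x0, y0, n)) =>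
    pvEmit kv.1 (runs ++ [(x0 * scale, y0 * scale, n * scale, scale)]) lines

theorem pv_portA_eq (width height : Int) (rows : List (List (Int × Int × Int × Int))) (scale : Int) :
    pixels_to_svg width height rows scale =
      PySem.Str.join "\n"
        (((PySem.List.sorted ((PySem.List.enumerate rows 0).foldl pvOuterA PySem.Dict.empty).items
            (fun kv => -(PySem.List.len kv.2))).foldl (pvEmitA scale)
            [pvHeader (width * scale) (height * scale)]) ++ ["</svg>"]) := rfl

theorem pv_portB_eq (width height : Int) (rows : List (List (Int × Int × Int × Int))) (scale : Int) :
    pixels_to_svg_alt width height rows scale =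
      PySem.Str.join "\n"
        (((PySem.List.sorted ((PySem.List.enumerate rows 0).foldl (pvOuterB scale) PySem.Dict.empty).items
            (fun kv => -kv.2.1)).foldl (pvEmitB scale)
            [pvHeader (width * scale) (height * scale)]) ++ ["</svg>"]) := rfl

-- per-color incremental state reached after a list of pixels
def pvStepList (scale : Int) (st : Int × List (Int × Int × Int × Int) × (Int × Int × Int))
    (p : Int × Int) : Int × List (Int × Int × Int × Int) × (Int × Int × Int) :=
  pvStepColor scale st p.1 p.2

def pvG1 (scale : Int) : List (Int × Int) → Int × List (Int × Int × Int × Int) × (Int × Int × Int)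
  | [] => (0, [], (0, 0, 0))
  | (x, y) :: t => t.foldl (pvStepList scale) (1, [], (x, y, 1))

def pvFin (scale : Int) (st : Int × List (Int × Int × Int × Int) × (Int × Int × Int)) :
    List (Int × Int × Int × Int) :=
  st.2.1 ++ [(st.2.2.1 * scale, st.2.2.2.1 * scale, st.2.2.2.2 * scale, scale)]

def pvF (scale : Int) (p : String × List (Int × Int)) :
    String × (Int × List (Int × Int × Int × Int) × (Int × Int × Int)) :=
  (p.1, pvG1 scale p.2)

def pvLexLt (u v : Int × Int) : Prop := u.2 < v.2 ∨ (u.2 = v.2 ∧ u.1 < v.1)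
def pvBound (y x : Int) (u : Int × Int) : Prop := u.2 < y ∨ (u.2 = y ∧ u.1 < x)

-- the loop invariant: B's dict is A's dict mapped through pvF, keys unique, every
-- value nonempty, lex-sorted, and strictly before the current scan position (y, x)
def pvInv (scale y x : Int) (dA : PySem.Dict String (List (Int × Int)))
    (dB : PySem.Dict String (Int × List (Int × Int × Int × Int) × (Int × Int × Int))) : Prop :=
  dA.keys.Nodup ∧ dB.items = dA.items.map (pvF scale) ∧
    ∀ p ∈ dA.items, p.2 ≠ [] ∧ p.2.Pairwise pvLexLt ∧ ∀ u ∈ p.2, pvBound y x u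

theorem pv_count (scale : Int) : ∀ (t : List (Int × Int)) st,
    (t.foldl (pvStepList scale) st).1 = st.1 + t.length := by
  intro t
  induction t with
  | nil => simp
  | cons p t ih =>
    intro st
    simp only [List.foldl_cons, ih, List.length_cons]
    have : (pvStepList scale st p).1 = st.1 + 1 := by
      obtain ⟨cnt, runs, x0, y0, n⟩ := st
      simp only [pvStepList, pvStepColor]
      split <;> rfl
    rw [this]; push_cast; ring


theorem pvG1_fst (scale : Int) (l : List (Int × Int)) : (pvG1 scale l).1 = (l.length : Int) := by
  match l with
  | [] => rfl
  | (x, y) :: t => simp [pvG1, pv_count]; ring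


theorem pvExt_ge : ∀ (t : List (Int × Int)) (x0 y0 n : Int), n ≤ pvExtendRun t x0 y0 n := by
  intro t
  induction t with
  | nil => intro x0 y0 n; simp [pvExtendRun]
  | cons p t ih =>
    intro x0 y0 n
    obtain ⟨nx, ny⟩ := p
    simp only [pvExtendRun]
    split
    · exact le_trans (by omega) (ih x0 y0 (n + 1))
    · exact le_refl n


theorem pvMergeAux (scale : Int) : ∀ (t : List (Int × Int)) (x0 y0 n cnt : Int)
    (runs : List (Int × Int × Int × Int)),
    pvFin scale (t.foldl (pvStepList scale) (cnt, runs, (x0, y0, n))) =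
      runs ++ (x0 * scale, y0 * scale, pvExtendRun t x0 y0 n * scale, scale) ::
        pvMergeLoop scale (t.drop (pvExtendRun t x0 y0 n - n).toNat) := by
  intro t
  induction t with
  | nil =>
    intro x0 y0 n cnt runs
    simp [pvFin, pvExtendRun, pvMergeLoop]
  | cons p tt ih =>
    intro x0 y0 n cnt runs
    obtain ⟨nx, ny⟩ := p
    by_cases hc : (ny == y0 && nx == x0 + n) = true
    · have hstep : pvStepList scale (cnt, runs, (x0, y0, n)) (nx, ny) = (cnt + 1, runs, (x0, y0, n + 1)) := by
        simp only [pvStepList, pvStepColor, hc, if_true]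
      have hext : pvExtendRun ((nx, ny) :: tt) x0 y0 n = pvExtendRun tt x0 y0 (n + 1) := by
        simp only [pvExtendRun, hc, if_true]
      have hge : n + 1 ≤ pvExtendRun tt x0 y0 (n + 1) := pvExt_ge tt x0 y0 (n + 1)
      have hdrop : ((nx, ny) :: tt).drop (pvExtendRun tt x0 y0 (n + 1) - n).toNat =
          tt.drop (pvExtendRun tt x0 y0 (n + 1) - (n + 1)).toNat := by
        have h1 : (pvExtendRun tt x0 y0 (n + 1) - n).toNat =
            (pvExtendRun tt x0 y0 (n + 1) - (n + 1)).toNat + 1 := by omega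
        rw [h1, List.drop_succ_cons]
      rw [List.foldl_cons, hstep, ih x0 y0 (n + 1) (cnt + 1) runs, hext, hdrop]
    · have hstep : pvStepList scale (cnt, runs, (x0, y0, n)) (nx, ny) =
          (cnt + 1, runs ++ [(x0 * scale, y0 * scale, n * scale, scale)], (nx, ny, 1)) := by
        simp [pvStepList, pvStepColor, hc]
      have hext : pvExtendRun ((nx, ny) :: tt) x0 y0 n = n := by
        simp [pvExtendRun, hc]
      rw [List.foldl_cons, hstep, ih nx ny 1 (cnt + 1) _, hext]
      have h0 : (n - n).toNat = 0 := by omega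
      rw [h0, List.drop_zero, pvMergeLoop]
      simp


theorem pvMergeEq (scale : Int) (l : List (Int × Int)) (h : l ≠ []) :
    pvFin scale (pvG1 scale l) = pvMergeLoop scale l := by
  match l with
  | [] => exact absurd rfl h
  | (x, y) :: t =>
    rw [pvG1, pvMergeAux scale t x y 1 1 [], pvMergeLoop]
    simp


theorem pvInsertBy_append {α : Type} (bef : α → α → Bool) (x : α) :
    ∀ (ys : List α), (∀ y ∈ ys, bef x y = false) → PySem.List.insertBy bef x ys = ys ++ [x] := by
  intro ys
  induction ys with
  | nil => intro _; rfl
  | cons y t ih =>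
    intro h
    rw [PySem.List.insertBy]
    simp only [h y (by simp), Bool.false_eq_true, if_false, List.cons_append]
    rw [ih (fun z hz => h z (by simp [hz]))]


theorem pvFoldInsertBy {α : Type} (bef : α → α → Bool) :
    ∀ (xs acc : List α), (∀ x ∈ xs, ∀ y ∈ acc, bef x y = false) →
      xs.Pairwise (fun a b => bef b a = false) →
      xs.foldl (fun acc x => PySem.List.insertBy bef x acc) acc = acc ++ xs := by
  intro xs
  induction xs with
  | nil => intro acc _ _; simp
  | cons x t ih =>
    intro acc h hp
    simp only [List.foldl_cons]
    rw [pvInsertBy_append bef x acc (h x (by simp))]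
    rw [ih (acc ++ [x]) ?_ (List.Pairwise.of_cons hp)]
    · simp
    · intro z hz w hw
      rcases List.mem_append.mp hw with hw | hw
      · exact h z (by simp [hz]) w hw
      · simp only [List.mem_singleton] at hw
        subst hw
        exact (List.pairwise_cons.mp hp).1 z hz


theorem pvSorted2_id (l : List (Int × Int)) (h : l.Pairwise pvLexLt) :
    PySem.List.sorted2 l (fun p => p.2) (fun p => p.1) = l := by
  have hb : ∀ (a b : Int × Int), pvLexLt a b →
      ((fun (u v : Int × Int) => decide (u.2 < v.2) || !decide (v.2 < u.2) && decide (u.1 < v.1)) b a) = false := by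
    intro a b hab
    rcases hab with h1 | ⟨h1, h2⟩ <;> simp <;> omega
  have := pvFoldInsertBy
      (fun (u v : Int × Int) => decide (u.2 < v.2) || !decide (v.2 < u.2) && decide (u.1 < v.1))
      l [] (by simp) (h.imp (fun hab => hb _ _ hab))
  simpa [PySem.List.sorted2] using this


theorem pvInsertBy_map {α β : Type} (f : α → β) (bef : α → α → Bool) (bef' : β → β → Bool)
    (hb : ∀ a b, bef' (f a) (f b) = bef a b) (x : α) :
    ∀ (ys : List α), PySem.List.insertBy bef' (f x) (ys.map f) = (PySem.List.insertBy bef x ys).map f := by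
  intro ys
  induction ys with
  | nil => rfl
  | cons y t ih =>
    rw [List.map_cons, PySem.List.insertBy, PySem.List.insertBy, hb]
    cases hbe : bef x y <;> simp [ih]


theorem pvSorted_map {α β : Type} (f : α → β) (key : α → Int) (key' : β → Int)
    (hk : ∀ a, key' (f a) = key a) (l : List α) :
    PySem.List.sorted (l.map f) key' = (PySem.List.sorted l key).map f := by
  have aux : ∀ (l' : List α) (ys : List α),
      (l'.map f).foldl (fun acc b => PySem.List.insertBy (fun a b => decide (key' a < key' b)) b acc) (ys.map f) =
        (l'.foldl (fun acc x => PySem.List.insertBy (fun a b => decide (key a < key b)) x acc) ys).map f := by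
    intro l'
    induction l' with
    | nil => intro ys; simp
    | cons x t ih =>
      intro ys
      simp only [List.map_cons, List.foldl_cons]
      rw [pvInsertBy_map f (fun a b => decide (key a < key b)) (fun a b => decide (key' a < key' b))
        (by intro a b; simp only []; rw [hk, hk]) x ys, ih]
  rw [PySem.List.sorted_eq_foldl_insertBy, PySem.List.sorted_eq_foldl_insertBy]
  simpa using aux l []


theorem pvKeysB {scale : Int} {dA : PySem.Dict String (List (Int × Int))}
    {dB : PySem.Dict String (Int × List (Int × Int × Int × Int) × (Int × Int × Int))}
    (h : dB.items = dA.items.map (pvF scale)) : dB.keys = dA.keys := by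
  simp only [PySem.Dict.keys, h, List.map_map]
  rfl


theorem pvInv_mono {scale y x y' x' : Int} {dA dB} (h : pvInv scale y x dA dB)
    (hw : ∀ u, pvBound y x u → pvBound y' x' u) : pvInv scale y' x' dA dB := by
  obtain ⟨h1, h2, h3⟩ := h
  exact ⟨h1, h2, fun p hp => ⟨(h3 p hp).1, (h3 p hp).2.1, fun u hu => hw u ((h3 p hp).2.2 u hu)⟩⟩


theorem pvG1_snoc (scale : Int) (l : List (Int × Int)) (h : l ≠ []) (p : Int × Int) :
    pvG1 scale (l ++ [p]) = pvStepList scale (pvG1 scale l) p := by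
  match l with
  | [] => exact absurd rfl h
  | (x, y) :: t => simp [pvG1, List.foldl_append]

theorem pvStepInv (scale y x : Int) (c : String) (dA dB) (h : pvInv scale y x dA dB) :
    pvInv scale y (x + 1)
      ((if dA.contains c then dA else dA.insert c ([] : List (Int × Int))).insert c
        ((if dA.contains c then dA else dA.insert c ([] : List (Int × Int))).getD c [] ++ [(x, y)]))
      (match dB.get? c with
       | none => dB.insert c (1, ([] : List (Int × Int × Int × Int)), (x, y, 1))
       | some st => dB.insert c (pvStepColor scale st x y)) := by
  obtain ⟨hnd, hmap, hvals⟩ := h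
  have hkeys : dB.keys = dA.keys := pvKeysB hmap
  have hndB : dB.keys.Nodup := by rw [hkeys]; exact hnd
  by_cases hc : dA.contains c = true
  · -- existing color
    obtain ⟨l, hl⟩ : ∃ l, dA.get? c = some l := by
      cases hget : dA.get? c with
      | none => exact absurd ((PySem.Dict.get?_eq_none_iff_contains dA c).mp hget) (by simp [hc])
      | some l => exact ⟨l, rfl⟩
    have hmemA : (c, l) ∈ dA.items := PySem.Dict.mem_items_of_get?_eq_some dA hl
    have hlne : l ≠ [] := (hvals (c, l) hmemA).1
    have hBl : dB.get? c = some (pvG1 scale l) :=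
      PySem.Dict.get?_of_mem_items dB (by rw [hmap]; exact List.mem_map_of_mem hmemA) hndB
    have hBc : dB.contains c = true := by
      rw [PySem.Dict.contains_iff_mem_keys, hkeys]
      exact (PySem.Dict.contains_iff_mem_keys dA c).mp hc
    have hmatch : (match dB.get? c with
        | none => dB.insert c (1, ([] : List (Int × Int × Int × Int)), (x, y, 1))
        | some st => dB.insert c (pvStepColor scale st x y)) =
        dB.insert c (pvStepColor scale (pvG1 scale l) x y) := by rw [hBl]
    rw [hmatch]
    simp only [if_pos hc]
    rw [PySem.Dict.getD_of_get?_eq_some dA [] hl]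
    refine ⟨?_, ?_, ?_⟩
    · rw [PySem.Dict.keys_insert_of_contains dA _ hc]; exact hnd
    · rw [PySem.Dict.items_insert_of_contains dA _ hc,
        PySem.Dict.items_insert_of_contains dB _ hBc, hmap, List.map_map, List.map_map]
      refine List.map_congr_left ?_
      intro p hp
      by_cases hpc : p.1 = c
      · simp only [Function.comp, pvF, hpc, beq_self_eq_true, if_pos]
        rw [pvG1_snoc scale l hlne (x, y)]
        rfl
      · simp [Function.comp, pvF, hpc]
    · intro p hp
      rcases (PySem.Dict.mem_items_insert dA c (l ++ [(x, y)]) p).mp hp with hnew | ⟨hold, _⟩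
      · subst hnew
        refine ⟨by simp, ?_, ?_⟩
        · rw [List.pairwise_append]
          refine ⟨(hvals (c, l) hmemA).2.1, List.pairwise_singleton _ _, ?_⟩
          intro u hu v hv
          simp only [List.mem_singleton] at hv
          subst hv
          exact (hvals (c, l) hmemA).2.2 u hu
        · intro u hu
          rcases List.mem_append.mp hu with hu | hu
          · rcases (hvals (c, l) hmemA).2.2 u hu with h1 | ⟨h1, h2⟩
            · exact Or.inl h1
            · exact Or.inr ⟨h1, by omega⟩
          · simp only [List.mem_singleton] at hu
            subst hu
            exact Or.inr ⟨rfl, by omega⟩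
      · refine ⟨(hvals p hold).1, (hvals p hold).2.1, ?_⟩
        intro u hu
        rcases (hvals p hold).2.2 u hu with h1 | ⟨h1, h2⟩
        · exact Or.inl h1
        · exact Or.inr ⟨h1, by omega⟩
  · -- fresh color
    have hcf : dA.contains c = false := by simpa using hc
    have hnotmem : c ∉ dA.keys := fun hm => hc ((PySem.Dict.contains_iff_mem_keys dA c).mpr hm)
    have hBnone : dB.get? c = none := by
      rw [PySem.Dict.get?_eq_none_iff_not_mem_keys, hkeys]; exact hnotmem
    have hBcf : dB.contains c = false := by
      cases hb : dB.contains c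
      · rfl
      · exact absurd ((PySem.Dict.contains_iff_mem_keys dB c).mp hb) (hkeys ▸ hnotmem)
    have hmatch : (match dB.get? c with
        | none => dB.insert c (1, ([] : List (Int × Int × Int × Int)), (x, y, 1))
        | some st => dB.insert c (pvStepColor scale st x y)) =
        dB.insert c (1, ([] : List (Int × Int × Int × Int)), (x, y, 1)) := by rw [hBnone]
    rw [hmatch]
    simp only [hcf, Bool.false_eq_true, if_false]
    rw [PySem.Dict.getD_insert_self, PySem.Dict.insert_insert_self]
    refine ⟨?_, ?_, ?_⟩
    · rw [PySem.Dict.keys_insert_of_not_contains dA _ hcf]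
      simp [List.nodup_append, hnd]
      exact fun a ha ha' => hnotmem (ha' ▸ ha)
    · rw [PySem.Dict.items_insert_of_not_contains dA _ hcf,
        PySem.Dict.items_insert_of_not_contains dB _ hBcf, hmap]
      simp [pvF, pvG1]
    · intro p hp
      rcases (PySem.Dict.mem_items_insert dA c ([] ++ [(x, y)]) p).mp hp with hnew | ⟨hold, _⟩
      · subst hnew
        refine ⟨by simp, by simp, ?_⟩
        intro u hu
        simp only [List.nil_append, List.mem_singleton] at hu
        subst hu
        exact Or.inr ⟨rfl, by omega⟩
      · refine ⟨(hvals p hold).1, (hvals p hold).2.1, ?_⟩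
        intro u hu
        rcases (hvals p hold).2.2 u hu with h1 | ⟨h1, h2⟩
        · exact Or.inl h1
        · exact Or.inr ⟨h1, by omega⟩


theorem pvRowInv (scale y : Int) : ∀ (cells : List (Int × Int × Int × Int)) (x0 : Int) dA dB,
    pvInv scale y x0 dA dB →
    pvInv scale y (x0 + cells.length)
      ((PySem.List.enumerate cells x0).foldl (pvInnerA y) dA)
      ((PySem.List.enumerate cells x0).foldl (pvInnerB scale y) dB) := by
  intro cells
  induction cells with
  | nil =>
    intro x0 dA dB h
    simpa [PySem.List.enumerate_nil] using h
  | cons cell cs ih =>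
    intro x0 dA dB h
    obtain ⟨r, g, b, a⟩ := cell
    rw [PySem.List.enumerate_cons, List.foldl_cons, List.foldl_cons]
    have harith : x0 + (((r, g, b, a) :: cs).length : Int) = (x0 + 1) + (cs.length : Int) := by
      simp only [List.length_cons]; push_cast; ring
    rw [harith]
    by_cases ha : (a == 0) = true
    · have hA : pvInnerA y dA (x0, (r, g, b, a)) = dA := by simp [pvInnerA, ha]
      have hB : pvInnerB scale y dB (x0, (r, g, b, a)) = dB := by simp [pvInnerB, ha]
      rw [hA, hB]
      refine ih (x0 + 1) dA dB (pvInv_mono h ?_)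
      intro u hu
      rcases hu with h1 | ⟨h1, h2⟩
      · exact Or.inl h1
      · exact Or.inr ⟨h1, by omega⟩
    · have hA : pvInnerA y dA (x0, (r, g, b, a)) =
          ((if dA.contains (pvColor r g b a) then dA
            else dA.insert (pvColor r g b a) ([] : List (Int × Int))).insert (pvColor r g b a)
            ((if dA.contains (pvColor r g b a) then dA
              else dA.insert (pvColor r g b a) ([] : List (Int × Int))).getD (pvColor r g b a) [] ++
              [(x0, y)])) := by
        simp [pvInnerA, ha]
      have hB : pvInnerB scale y dB (x0, (r, g, b, a)) =
          (match dB.get? (pvColor r g b a) with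
           | none => dB.insert (pvColor r g b a) (1, ([] : List (Int × Int × Int × Int)), (x0, y, 1))
           | some st => dB.insert (pvColor r g b a) (pvStepColor scale st x0 y)) := by
        simp [pvInnerB, ha]
      rw [hA, hB]
      exact ih (x0 + 1) _ _ (pvStepInv scale y x0 (pvColor r g b a) dA dB h)


theorem pvRowsInv (scale : Int) : ∀ (rs : List (List (Int × Int × Int × Int))) (y : Int) dA dB,
    pvInv scale y 0 dA dB →
    pvInv scale (y + rs.length) 0
      ((PySem.List.enumerate rs y).foldl pvOuterA dA)
      ((PySem.List.enumerate rs y).foldl (pvOuterB scale) dB) := by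
  intro rs
  induction rs with
  | nil =>
    intro y dA dB h
    simpa [PySem.List.enumerate_nil] using h
  | cons row rt ih =>
    intro y dA dB h
    rw [PySem.List.enumerate_cons, List.foldl_cons, List.foldl_cons]
    have harith : y + (((row :: rt)).length : Int) = (y + 1) + (rt.length : Int) := by
      simp only [List.length_cons]; push_cast; ring
    rw [harith]
    refine ih (y + 1) (pvOuterA dA (y, row)) (pvOuterB scale dB (y, row)) ?_
    refine pvInv_mono (pvRowInv scale y row 0 dA dB h) ?_
    intro u hu
    rcases hu with h1 | ⟨h1, h2⟩
    · exact Or.inl (by omega)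
    · exact Or.inl (by omega)


theorem pvInv_empty (scale : Int) : pvInv scale 0 0 PySem.Dict.empty PySem.Dict.empty := by
  refine ⟨?_, ?_, ?_⟩ <;> simp [PySem.Dict.empty, PySem.Dict.keys]


-- ===== VERDICT (by name: the statement is the Claim_ definition above) =====
theorem pixels_to_svg_spec : Claim_equal_pixels_to_svg := by
  intro width height rows scale _
  unfold Spec_pixels_to_svg
  rw [pv_portA_eq, pv_portB_eq]
  obtain ⟨hnd, hmap, hvals⟩ :=
    pvRowsInv scale rows 0 PySem.Dict.empty PySem.Dict.empty (pvInv_empty scale)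
  have hsort : PySem.List.sorted
      ((PySem.List.enumerate rows 0).foldl (pvOuterB scale) PySem.Dict.empty).items
      (fun kv => -kv.2.1) =
      (PySem.List.sorted ((PySem.List.enumerate rows 0).foldl pvOuterA PySem.Dict.empty).items
        (fun kv => -(PySem.List.len kv.2))).map (pvF scale) := by
    rw [hmap]
    exact pvSorted_map (pvF scale) _ _ (fun p => by simp [pvF, pvG1_fst]) _
  rw [hsort, List.foldl_map]
  refine congrArg (PySem.Str.join "\n") (congrArg (fun L => L ++ ["</svg>"]) ?_)
  refine PySem.List.foldl_congr_mem _ _ _ _ ?_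
  intro acc kv hkv
  have hkv' : kv ∈ ((PySem.List.enumerate rows 0).foldl pvOuterA PySem.Dict.empty).items :=
    (PySem.List.mem_sorted _ _ _ _).mp hkv
  obtain ⟨hne, hpw, _⟩ := hvals kv hkv'
  have h1 : pvEmitB scale acc (pvF scale kv) = pvEmit kv.1 (pvFin scale (pvG1 scale kv.2)) acc := rfl
  rw [h1, pvMergeEq scale kv.2 hne]
  show pvEmit kv.1 (pvMergeRuns kv.2 scale) acc = pvEmit kv.1 (pvMergeLoop scale kv.2) acc
  rw [pvMergeRuns, pvSorted2_id kv.2 hpw]
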